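-- pv_equiv track=rewrite | github.com/MrBrantCode/unitest_baseline | mut_generate/mist_train_taco/taco_7274/solution.py | get_star_and_super_star
-- ===== SOURCE A (Python) =====
-- def get_star_and_super_star(arr, n):
--     # Initialize the list to store star elements
--     star = [arr[-1]]
--
--     # Traverse the array from the second last element to the first element
--     for i in arr[-2:-len(arr) - 1:-1]:
--         if i > star[-1]:
--             star.append(i)
--
--     # Find the maximum element in the star list
--     max_ele = max(star)
--
--     # Count the occurrences of the maximum element in the original array
--     count = 0
--     for i in arr:
--         if i == max_ele:
--             count += 1
--         if count > 1:
--             max_ele = -1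
--             break
--
--     # Return the result as a list with the super star element first and then the star elements in reverse order
--     return [max_ele] + star[::-1]
-- ===== SOURCE B (Python) =====
-- def get_star_and_super_star(arr, n):
--     # Suffix-maximum table, built right-to-left: after the reverse, sfx[i] == max(arr[i:]).
--     sfx = []
--     for x in reversed(arr):
--         sfx.append(x if not sfx or x > sfx[-1] else sfx[-1])
--     sfx.reverse()
--
--     m = sfx[0]                      # max(arr); IndexError on empty input, as in the original
--     super_star = m if arr.count(m) == 1 else -1
--
--     # Leaders in array order: arr[i] beats the strict suffix maximum, plus the last element.
--     leaders = [x for x, s in zip(arr, sfx[1:]) if x > s] + [arr[-1]]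
--
--     return [super_star] + leaders
-- ===== Notes on version B (the rewrite author's own statement) =====
-- stated objective: alternative
-- what changed: B replaces A's single right-to-left conditional-append leader scan with an explicit suffix-maximum table plus a left-to-right zip filter, and computes the super star from max(arr) with count() instead of A's break-on-second-occurrence loop.
import Mathlib
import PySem

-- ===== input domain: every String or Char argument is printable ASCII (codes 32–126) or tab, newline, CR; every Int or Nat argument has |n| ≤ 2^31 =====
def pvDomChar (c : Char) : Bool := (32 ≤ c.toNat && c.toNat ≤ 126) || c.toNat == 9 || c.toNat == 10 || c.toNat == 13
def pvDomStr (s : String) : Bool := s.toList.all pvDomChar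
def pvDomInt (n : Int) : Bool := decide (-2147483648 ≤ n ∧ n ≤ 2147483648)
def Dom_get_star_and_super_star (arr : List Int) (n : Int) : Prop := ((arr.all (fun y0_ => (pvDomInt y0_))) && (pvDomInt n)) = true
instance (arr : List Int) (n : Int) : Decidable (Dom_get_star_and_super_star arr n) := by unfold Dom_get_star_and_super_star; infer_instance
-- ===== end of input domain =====

-- B builds an explicit suffix-maximum table and a left-to-right zip filter instead of A's
-- right-to-left conditional-append scan; same O(n) cost, different decomposition.


-- ===== PORT A =====
-- star-building loop: for i in arr[-2:-len(arr)-1:-1]: if i > star[-1]: star.append(i)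
def aStar : List Int → List Int → List Int
  | star, [] => star
  | star, i :: rest =>
      aStar (if i > (PySem.List.pyGet? star (-1)).getD 0 then star ++ [i] else star) rest

-- count loop with the break: for i in arr: if i == max_ele: count += 1; if count > 1: max_ele = -1; break
def aCount : Int → Int → List Int → Int
  | max_ele, _count, [] => max_ele
  | max_ele, count, i :: rest =>
      let count := if i = max_ele then count + 1 else count
      if count > 1 then -1 else aCount max_ele count rest

def get_star_and_super_star (arr : List Int) (n : Int) : List Int :=
  match PySem.List.pyGet? arr (-1) with
  | none => []  -- arr[-1] raises IndexError: excluded by Pre_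
  | some last =>
      let star := aStar [last]
        ((PySem.List.slice? arr (some (-2)) (some (-(arr.length : Int) - 1)) (-1)).getD [])
      let max_ele := ((PySem.List.max? star (fun y => y)).getD 0)
      let res := aCount max_ele 0 arr
      res :: ((PySem.List.slice? star none none (-1)).getD [])

-- ===== PORT B =====
-- sfx loop over reversed(arr); the python list grows by append and is reversed afterwards,
-- so a cons-accumulator over arr.reverse yields the final (reversed) table directly.
def bCombine (x : Int) (s : List Int) : List Int :=
  (match s with | [] => x | m :: _ => if x > m then x else m) :: s

def bSfx : List Int → List Int → List Int
  | acc, [] => acc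
  | acc, x :: rest => bSfx (bCombine x acc) rest

def get_star_and_super_star_alt (arr : List Int) (n : Int) : List Int :=
  let sfx := bSfx [] arr.reverse
  match sfx with
  | [] => []  -- sfx[0] raises IndexError: excluded by Pre_
  | m :: sfxTail =>
      let super := if PySem.List.count arr m = 1 then m else -1
      let leaders := ((arr.zip sfxTail).filter (fun p => p.1 > p.2)).map (fun p => p.1)
        ++ [(PySem.List.pyGet? arr (-1)).getD 0]
      super :: leaders

-- ===== PRECONDITION & SPEC =====
-- Pre_ excludes only the empty list, on which both Pythons raise IndexError.
def Pre_get_star_and_super_star (arr : List Int) (n : Int) : Prop := arr ≠ []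
instance (arr : List Int) (n : Int) : Decidable (Pre_get_star_and_super_star arr n) := by
  unfold Pre_get_star_and_super_star; infer_instance

def pvWitness_get_star_and_super_star : List Int × Int := ([3, 1, 2], 3)

def Spec_get_star_and_super_star (arr : List Int) (n : Int) (out : List Int) : Prop := out = get_star_and_super_star_alt arr n
instance (arr : List Int) (n : Int) (out : List Int) : Decidable (Spec_get_star_and_super_star arr n out) := by unfold Spec_get_star_and_super_star; infer_instance

-- ===== CLAIM (what is proved, stated in full; the proofs are below) =====
def Claim_equal_get_star_and_super_star : Prop := ∀ (arr : List Int) (n : Int), Dom_get_star_and_super_star arr n → Pre_get_star_and_super_star arr n → Spec_get_star_and_super_star arr n (get_star_and_super_star arr n)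

-- ===== LEMMAS AND PROOFS =====

-- mathematical suffix-maximum table and leaders list, the common spec of both ports
def sfxOf : List Int → List Int
  | [] => []
  | x :: rest => bCombine x (sfxOf rest)

def ldOf : List Int → List Int
  | [] => []
  | x :: rest =>
      match sfxOf rest with
      | [] => [x]
      | m :: _ => if x > m then x :: ldOf rest else ldOf rest

lemma ldOf_cons (x : Int) (l : List Int) :
    ldOf (x :: l) = match sfxOf l with
      | [] => [x]
      | m :: _ => if x > m then x :: ldOf l else ldOf l := rfl

lemma ldOf_cons_of_nil (x : Int) (l : List Int) (hs : sfxOf l = []) :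
    ldOf (x :: l) = [x] := by rw [ldOf_cons, hs]

lemma ldOf_cons_of_cons (x : Int) (l : List Int) (m : Int) (s : List Int) (hs : sfxOf l = m :: s) :
    ldOf (x :: l) = if x > m then x :: ldOf l else ldOf l := by rw [ldOf_cons, hs]

lemma ldOf_singleton (x : Int) : ldOf [x] = [x] := rfl

-- sfxOf "onto" an accumulator: what bSfx computes
def sfxOnto : List Int → List Int → List Int
  | [], acc => acc
  | x :: l, acc => bCombine x (sfxOnto l acc)

lemma sfxOnto_append (u v : List Int) (acc : List Int) :
    sfxOnto (u ++ v) acc = sfxOnto u (sfxOnto v acc) := by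
  induction u with
  | nil => rfl
  | cons x u ih => simp [sfxOnto, ih]

lemma bSfx_eq (l acc : List Int) : bSfx acc l = sfxOnto l.reverse acc := by
  induction l generalizing acc with
  | nil => rfl
  | cons x l ih => simp [bSfx, ih, sfxOnto_append, sfxOnto]

lemma sfxOnto_nil (l : List Int) : sfxOnto l [] = sfxOf l := by
  induction l with
  | nil => rfl
  | cons x l ih => simp [sfxOnto, sfxOf, ih]

lemma bSfx_reverse (arr : List Int) : bSfx [] arr.reverse = sfxOf arr := by
  rw [bSfx_eq, List.reverse_reverse, sfxOnto_nil]

lemma sfxOf_eq_nil_iff (l : List Int) : sfxOf l = [] ↔ l = [] := by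
  cases l with
  | nil => simp [sfxOf]
  | cons x l => simp [sfxOf, bCombine]

-- M l = max(l) for nonempty l
def M (l : List Int) : Int := (sfxOf l).headD 0

lemma M_cons (x : Int) (l : List Int) :
    M (x :: l) = if l = [] then x else if x > M l then x else M l := by
  cases h : sfxOf l with
  | nil => simp [M, sfxOf, bCombine, (sfxOf_eq_nil_iff l).mp h]
  | cons m s =>
    have hl : l ≠ [] := by
      intro he; rw [he] at h; simp [sfxOf] at h
    simp [M, sfxOf, bCombine, h, hl]

lemma M_mem (l : List Int) (h : l ≠ []) : M l ∈ l := by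
  induction l with
  | nil => exact absurd rfl h
  | cons x l ih =>
    rw [M_cons]
    split_ifs with h1 h2
    · exact List.mem_cons_self
    · exact List.mem_cons_self
    · exact List.mem_cons_of_mem _ (ih h1)

lemma ldOf_ne_nil (l : List Int) (h : l ≠ []) : ldOf l ≠ [] := by
  cases l with
  | nil => exact absurd rfl h
  | cons x l =>
    cases hs : sfxOf l with
    | nil => simp [ldOf_cons_of_nil x l hs]
    | cons m s =>
      have hl : l ≠ [] := by intro he; rw [he] at hs; simp [sfxOf] at hs
      rw [ldOf_cons_of_cons x l m s hs]
      by_cases hx : x > m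
      · simp [hx]
      · simpa [hx] using ldOf_ne_nil l hl

lemma ldOf_head (l : List Int) (h : l ≠ []) : (ldOf l).headD 0 = M l := by
  cases l with
  | nil => exact absurd rfl h
  | cons x l =>
    cases hs : sfxOf l with
    | nil =>
      have hl : l = [] := (sfxOf_eq_nil_iff l).mp hs
      subst hl
      simp [ldOf_singleton, M_cons]
    | cons m s =>
      have hl : l ≠ [] := by intro he; rw [he] at hs; simp [sfxOf] at hs
      have hm : M l = m := by simp [M, hs]
      rw [ldOf_cons_of_cons x l m s hs, M_cons, if_neg hl, ← hm]
      by_cases hx : x > M l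
      · simp [hx]
      · rw [if_neg hx, if_neg hx]
        exact ldOf_head l hl

lemma ldOf_bound (l : List Int) : ∀ y ∈ ldOf l, y ≤ M l := by
  induction l with
  | nil => simp [ldOf]
  | cons x l ih =>
    intro y hy
    cases hs : sfxOf l with
    | nil =>
      have hl : l = [] := (sfxOf_eq_nil_iff l).mp hs
      rw [ldOf_cons_of_nil x l hs] at hy; simp at hy
      simp [hy, hl, M_cons]
    | cons m s =>
      have hl : l ≠ [] := by intro he; rw [he] at hs; simp [sfxOf] at hs
      have hm : M l = m := by simp [M, hs]
      rw [ldOf_cons_of_cons x l m s hs] at hy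
      rw [M_cons, if_neg hl]
      by_cases hx : x > m
      · rw [if_pos hx] at hy
        rcases List.mem_cons.mp hy with rfl | hy
        · split_ifs <;> omega
        · have := ih y hy; split_ifs <;> omega
      · rw [if_neg hx] at hy
        have := ih y hy; split_ifs <;> omega

lemma M_mem_ldOf (l : List Int) (h : l ≠ []) : M l ∈ ldOf l := by
  have h1 := ldOf_ne_nil l h
  have h2 := ldOf_head l h
  cases hld : ldOf l with
  | nil => exact absurd hld h1
  | cons a t => rw [hld] at h2; simp at h2; simp [h2]

-- A's star loop computes the reversed leaders list
lemma aStar_eq (t s : List Int) (hs : s ≠ []) :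
    aStar (ldOf s).reverse t.reverse = (ldOf (t ++ s)).reverse := by
  induction t using List.reverseRecOn generalizing s with
  | nil => simp [aStar]
  | append_singleton t y ih =>
    rw [List.reverse_append]
    simp only [List.reverse_cons, List.reverse_nil, List.nil_append, List.singleton_append]
    rw [aStar]
    have hgl : (PySem.List.pyGet? (ldOf s).reverse (-1)).getD 0 = M s := by
      rw [PySem.List.pyGet?_neg_one, List.getLast?_reverse]
      cases hld : ldOf s with
      | nil => exact absurd hld (ldOf_ne_nil s hs)
      | cons a u =>
        have h2 := ldOf_head s hs; rw [hld] at h2; simp at h2; simp [h2]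
    have hstep : (if y > (PySem.List.pyGet? (ldOf s).reverse (-1)).getD 0
        then (ldOf s).reverse ++ [y] else (ldOf s).reverse) = (ldOf (y :: s)).reverse := by
      rw [hgl]
      cases hsx : sfxOf s with
      | nil => exact absurd ((sfxOf_eq_nil_iff s).mp hsx) hs
      | cons m u =>
        have hm : M s = m := by simp [M, hsx]
        rw [ldOf_cons_of_cons y s m u hsx]
        by_cases hy : y > m
        · simp [hy, hm]
        · simp [hy, hm]
    rw [hstep, ih (y :: s) (by simp), List.append_assoc]
    simp

-- the slice arr[-2:-len(arr)-1:-1] is the reversed list without its last element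
lemma filterMap_eq_map_of_some {α β : Type} (l : List α) (f : α → Option β) (g : α → β)
    (h : ∀ a ∈ l, f a = some (g a)) : l.filterMap f = l.map g := by
  induction l with
  | nil => rfl
  | cons a l ih =>
    simp [h a List.mem_cons_self, ih (fun a ha => h a (List.mem_cons_of_mem _ ha))]

lemma slice_A (arr : List Int) :
    (PySem.List.slice? arr (some (-2)) (some (-(arr.length : Int) - 1)) (-1)).getD []
      = arr.dropLast.reverse := by
  cases arr with
  | nil => rfl
  | cons a t =>
    rw [PySem.List.slice?]
    simp only [if_neg (by norm_num : ¬ ((-1 : Int) = 0))]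
    rw [PySem.List.sliceIndices]
    norm_num
    have h1 : (-1:Int) < 1 + (t.length : Int) := by omega
    simp only [if_pos h1]
    have hcount : (if (2 + (-1:Int)) ≤ (t.length:Int) then
        (-2 + ((t.length:Int) + 1) - (-1)).toNat else 0) = t.length := by
      split_ifs with h <;> omega
    rw [hcount]
    rw [filterMap_eq_map_of_some (List.range t.length) _
      (fun x => (a :: t).getD (t.length - 1 - x) 0) ?_]
    · apply List.ext_getElem
      · simp
      · intro j hj hj'
        simp only [List.getElem_map, List.getElem_range, List.getElem_reverse]
        have hdl : (a :: t).dropLast.length = t.length := by simp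
        rw [List.getElem_dropLast]
        have hidx : t.length - 1 - j < (a :: t).length := by simp; omega
        rw [List.getD_eq_getElem _ _ hidx]
        congr 1
        simp only [hdl] at hj' ⊢
    · intro x hx
      simp only [List.mem_range] at hx
      have hn : (-2 + ((t.length:Int) + 1) + -(x:Int)).toNat = t.length - 1 - x := by omega
      rw [hn]
      have hlt : t.length - 1 - x < (a :: t).length := by simp; omega
      simp only []
      rw [List.getElem?_eq_getElem hlt, List.getD_eq_getElem _ _ hlt]

-- A's count loop: -1 as soon as a second occurrence of max_ele is seen
lemma aCount_eq (l : List Int) (c m : Int) (hc0 : c ≤ 1) :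
    aCount m c l = if 2 ≤ c + (l.count m : Int) then -1 else m := by
  induction l generalizing c with
  | nil =>
    rw [aCount]
    rw [if_neg (by simp; omega)]
  | cons i rest ih =>
    rw [aCount]
    by_cases hi : i = m
    · rw [if_pos hi]
      have hcnt : ((i :: rest).count m : Int) = (rest.count m : Int) + 1 := by
        rw [hi]; simp [List.count_cons_self]
      by_cases hc : c + 1 > 1
      · rw [if_pos hc, if_pos (by omega)]
      · rw [if_neg hc, ih (c + 1) (by omega), hcnt]
        split_ifs with h1 h2 <;> omega
    · rw [if_neg hi]
      have hcnt : ((i :: rest).count m : Int) = (rest.count m : Int) := by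
        simp [hi]
      rw [if_neg (by omega : ¬ c > 1), ih c hc0, hcnt]

-- B's leaders equal ldOf
lemma bLeaders_eq (arr : List Int) (h : arr ≠ []) :
    ((arr.zip (sfxOf arr).tail).filter (fun p => p.1 > p.2)).map (fun p => p.1)
      ++ [(PySem.List.pyGet? arr (-1)).getD 0] = ldOf arr := by
  induction arr with
  | nil => exact absurd rfl h
  | cons x rest ih =>
    cases rest with
    | nil => simp [sfxOf, bCombine, ldOf_singleton, PySem.List.pyGet?_neg_one]
    | cons r rs =>
      cases hs : sfxOf (r :: rs) with
      | nil => simp [sfxOf, bCombine] at hs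
      | cons m s =>
        have htail : (sfxOf (x :: r :: rs)).tail = m :: s := by
          show (bCombine x (sfxOf (r :: rs))).tail = m :: s
          rw [hs]; rfl
        have hsx : (sfxOf (r :: rs)).tail = s := by rw [hs]; rfl
        have hlast : (PySem.List.pyGet? (x :: r :: rs) (-1)).getD 0
            = (PySem.List.pyGet? (r :: rs) (-1)).getD 0 := by
          rw [PySem.List.pyGet?_neg_one, PySem.List.pyGet?_neg_one, List.getLast?_cons_cons]
        rw [ldOf_cons_of_cons x (r :: rs) m s hs, htail]
        have hzip : (x :: r :: rs).zip (m :: s) = (x, m) :: ((r :: rs).zip s) := rfl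
        rw [hzip, List.filter_cons]
        by_cases hx : x > m
        · rw [if_pos (by simpa using hx), if_pos hx]
          simp only [List.map_cons, List.cons_append]
          rw [hlast, ← hsx, ih (by simp)]
        · rw [if_neg (by simpa using hx), if_neg hx]
          rw [hlast, ← hsx, ih (by simp)]

lemma foldl_max_eq (l : List Int) (c m : Int) (hb : ∀ y ∈ l, y ≤ m) (hc : c ≤ m)
    (hm : m ∈ c :: l) : l.foldl max c = m := by
  induction l generalizing c with
  | nil => simp only [List.foldl_nil]; simp at hm; omega
  | cons x l ih =>
    rw [List.foldl_cons]
    apply ih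
    · exact fun y hy => hb y (List.mem_cons_of_mem _ hy)
    · have := hb x List.mem_cons_self
      simp only [max_le_iff]
      omega
    · rcases List.mem_cons.mp hm with rfl | hm2
      · have hx := hb x List.mem_cons_self
        have : max m x = m := by omega
        rw [this]; exact List.mem_cons_self
      · rcases List.mem_cons.mp hm2 with rfl | hm3
        · have : max c m = m := by omega
          rw [this]; exact List.mem_cons_self
        · exact List.mem_cons_of_mem _ hm3

lemma max_star (arr : List Int) (h : arr ≠ []) :
    (PySem.List.max? ((ldOf arr).reverse) (fun y => y)).getD 0 = M arr := by
  cases hld : (ldOf arr).reverse with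
  | nil =>
    exact absurd (by simpa using hld) (ldOf_ne_nil arr h)
  | cons c tl =>
    rw [PySem.List.max?_id_cons]
    simp only [Option.getD_some]
    apply foldl_max_eq
    · intro y hy
      have : y ∈ (ldOf arr).reverse := by rw [hld]; exact List.mem_cons_of_mem _ hy
      exact ldOf_bound arr y (List.mem_reverse.mp this)
    · have : c ∈ (ldOf arr).reverse := by rw [hld]; exact List.mem_cons_self
      exact ldOf_bound arr c (List.mem_reverse.mp this)
    · rw [← hld, List.mem_reverse]
      exact M_mem_ldOf arr h

lemma star_eq (arr : List Int) (h : arr ≠ []) :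
    aStar [arr.getLast h] (arr.dropLast.reverse) = (ldOf arr).reverse := by
  have h1 : [arr.getLast h] = (ldOf [arr.getLast h]).reverse := by
    rw [ldOf_singleton]; rfl
  rw [h1, aStar_eq arr.dropLast [arr.getLast h] (by simp),
    List.dropLast_append_getLast h]

theorem get_star_and_super_star_spec : Claim_equal_get_star_and_super_star := by
  intro arr n _ hpre
  have h : arr ≠ [] := hpre
  unfold Spec_get_star_and_super_star
  unfold get_star_and_super_star get_star_and_super_star_alt
  rw [PySem.List.pyGet?_neg_one, bSfx_reverse]
  cases hga : arr.getLast? with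
  | none => exact absurd (List.getLast?_eq_none_iff.mp hga) h
  | some last =>
    dsimp only
    cases hs : sfxOf arr with
    | nil => exact absurd ((sfxOf_eq_nil_iff arr).mp hs) h
    | cons m s =>
      dsimp only
      have hlast_eq : arr.getLast h = last := by
        have := List.getLast?_eq_some_getLast h
        rw [hga] at this
        exact (Option.some.injEq _ _).mp this.symm
      have hm : M arr = m := by simp [M, hs]
      have hsx : s = (sfxOf arr).tail := by rw [hs]; rfl
      -- A's star list is the reversed leaders list
      have hstar : aStar [last] ((PySem.List.slice? arr (some (-2))
          (some (-(arr.length : Int) - 1)) (-1)).getD []) = (ldOf arr).reverse := by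
        rw [slice_A, ← hlast_eq, star_eq arr h]
      rw [hstar, max_star arr h, PySem.List.slice?_none_none_neg_one]
      simp only [Option.getD_some, List.reverse_reverse]
      -- B's leaders are the leaders list
      have hld : ((arr.zip s).filter (fun p => p.1 > p.2)).map (fun p => p.1)
          ++ [last] = ldOf arr := by
        have hb := bLeaders_eq arr h
        rw [PySem.List.pyGet?_neg_one, hga] at hb
        rw [hsx]
        simpa using hb
      rw [hld]
      congr 1
      -- A's break loop head vs B's count test head
      rw [aCount_eq arr 0 (M arr) (by omega), hm]
      have hmem : m ∈ arr := by rw [← hm]; exact M_mem arr h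
      have hcnt : 1 ≤ (arr.count m : Int) := by
        have := List.count_pos_iff.mpr hmem
        omega
      rw [PySem.List.count_eq]
      by_cases h2 : 2 ≤ (0:Int) + (arr.count m : Int)
      · rw [if_pos h2, if_neg (by omega)]
      · rw [if_neg h2, if_pos (by omega)]
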